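-- pv_equiv track=rewrite | github.com/faiyaz72/codingPractice | InterviewPrep/robin.py | aggregate_price
-- ===== SOURCE A (Python) =====
-- from collections import Counter, defaultdict, deque
-- from typing import List
--
-- def aggregate_price(buy_orders: List[tuple]):
--   price_map = defaultdict(int)
--   for price, quantity in buy_orders:
--     price_map[price]+=quantity
--
--   result = []
--   for key, value in price_map.items():
--     result.append((key, value))
--
--   return sorted(result, key=lambda x: x[0])
-- ===== SOURCE B (Python) =====
-- def aggregate_price(buy_orders):
--   ordered = sorted(buy_orders, key=lambda x: x[0])
--   result = []
--   current_price = None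
--   total = 0
--   for price, quantity in ordered:
--     if current_price is None:
--       current_price, total = price, quantity
--     elif price == current_price:
--       total += quantity
--     else:
--       result.append((current_price, total))
--       current_price, total = price, quantity
--   if current_price is not None:
--     result.append((current_price, total))
--   return result
-- ===== Notes on version B (the rewrite author's own statement) =====
-- stated objective: alternative
-- what changed: B replaces A's defaultdict aggregation followed by a key sort with a sort-then-group single pass: sort a copy of the orders by price, then scan once keeping a current price and running total, flushing a (price, total) pair whenever the price changes.
import Mathlib
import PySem

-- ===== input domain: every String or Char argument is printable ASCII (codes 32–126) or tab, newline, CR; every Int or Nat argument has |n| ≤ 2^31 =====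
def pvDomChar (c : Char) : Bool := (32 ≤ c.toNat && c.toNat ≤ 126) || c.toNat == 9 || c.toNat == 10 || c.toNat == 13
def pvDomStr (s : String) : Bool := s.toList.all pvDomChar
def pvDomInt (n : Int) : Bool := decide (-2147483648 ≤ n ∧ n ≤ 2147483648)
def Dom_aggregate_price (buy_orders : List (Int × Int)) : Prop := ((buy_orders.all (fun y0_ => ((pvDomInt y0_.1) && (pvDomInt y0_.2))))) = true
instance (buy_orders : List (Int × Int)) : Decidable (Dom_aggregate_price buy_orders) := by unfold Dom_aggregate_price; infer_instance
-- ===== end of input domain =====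

-- B replaces A's dict aggregation + key sort by a sort-then-group single pass; objective: alternative algorithm.

-- ===== PORT A =====
def aggregate_price (buy_orders : List (Int × Int)) : List (Int × Int) :=
  let price_map : PySem.Dict Int Int :=
    buy_orders.foldl (fun d pq => d.modify pq.1 0 (fun v => v + pq.2)) PySem.Dict.empty
  let result : List (Int × Int) :=
    price_map.items.foldl (fun acc kv => acc ++ [(kv.1, kv.2)]) []
  PySem.List.sorted result (fun x => x.1) false

-- ===== PORT B =====
-- loop body of Source B's for-loop (state: result, current_price, total)
def pvBStep (st : List (Int × Int) × Option Int × Int) (pq : Int × Int) :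
    List (Int × Int) × Option Int × Int :=
  match st with
  | (result, none, _) => (result, some pq.1, pq.2)
  | (result, some c, total) =>
    if pq.1 = c then (result, some c, total + pq.2)
    else (result ++ [(c, total)], some pq.1, pq.2)

-- Source B's final flush after the loop
def pvBFin (st : List (Int × Int) × Option Int × Int) : List (Int × Int) :=
  match st with
  | (result, none, _) => result
  | (result, some c, total) => result ++ [(c, total)]

def aggregate_price_alt (buy_orders : List (Int × Int)) : List (Int × Int) :=
  let ordered := PySem.List.sorted buy_orders (fun x => x.1) false
  pvBFin (ordered.foldl pvBStep ([], none, 0))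

-- ===== PRECONDITION & SPEC =====
def Spec_aggregate_price (buy_orders : List (Int × Int)) (out : List (Int × Int)) : Prop := out = aggregate_price_alt buy_orders
instance (buy_orders : List (Int × Int)) (out : List (Int × Int)) : Decidable (Spec_aggregate_price buy_orders out) := by unfold Spec_aggregate_price; infer_instance

-- ===== CLAIM (what is proved, stated in full; the proofs are below) =====
def Claim_equal_aggregate_price : Prop := ∀ (buy_orders : List (Int × Int)), Dom_aggregate_price buy_orders → Spec_aggregate_price buy_orders (aggregate_price buy_orders)

-- ===== LEMMAS AND PROOFS =====

-- total quantity at price k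
def sumAt (l : List (Int × Int)) (k : Int) : Int :=
  ((l.filter (fun p => p.1 == k)).map Prod.snd).sum

-- proof-side recursive grouping of an (adjacent-equal-keys) list
def grp : List (Int × Int) → List (Int × Int)
  | [] => []
  | p :: rest =>
    match grp rest with
    | [] => [p]
    | q :: gs => if p.1 = q.1 then (p.1, p.2 + q.2) :: gs else p :: q :: gs

lemma sumAt_cons (p : Int × Int) (l : List (Int × Int)) (k : Int) :
    sumAt (p :: l) k = (if p.1 = k then p.2 else 0) + sumAt l k := by
  simp only [sumAt, List.filter_cons]
  by_cases h : p.1 = k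
  · simp [h]
  · simp [h]

lemma sumAt_perm {l l' : List (Int × Int)} (h : l.Perm l') (k : Int) :
    sumAt l k = sumAt l' k := by
  unfold sumAt
  exact ((h.filter _).map _).sum_eq

lemma getD_fold (l : List (Int × Int)) (d : PySem.Dict Int Int) (k : Int) :
    (l.foldl (fun d pq => d.modify pq.1 0 (fun v => v + pq.2)) d).getD k 0
      = d.getD k 0 + sumAt l k := by
  induction l generalizing d with
  | nil => simp [sumAt]
  | cons p l ih =>
    simp only [List.foldl_cons]
    rw [ih, PySem.Dict.getD_modify, sumAt_cons]
    split_ifs with h1 h2 <;> try subst h1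
    all_goals omega

lemma items_fold (xs : List (Int × Int)) :
    (xs.foldl (fun d pq => d.modify pq.1 0 (fun v => v + pq.2)) (PySem.Dict.empty : PySem.Dict Int Int)).items
      = (PySem.Set.ofList (xs.map Prod.fst)).map (fun k => (k, sumAt xs k)) := by
  have hnd : (xs.foldl (fun d pq => d.modify pq.1 0 (fun v => v + pq.2)) (PySem.Dict.empty : PySem.Dict Int Int)).keys.Nodup := by
    apply PySem.Dict.nodup_keys_foldl_modify_key
    simp [PySem.Dict.keys_empty]
  rw [PySem.Dict.items_eq_map_keys _ hnd 0]
  rw [PySem.Dict.keys_foldl_modify_key]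
  have hkeys : PySem.Set.update (PySem.Dict.empty : PySem.Dict Int Int).keys (xs.map Prod.fst)
      = PySem.Set.ofList (xs.map Prod.fst) := by
    rw [PySem.Dict.keys_empty]
    rfl
  rw [hkeys]
  apply List.map_congr_left
  intro k _
  rw [getD_fold, PySem.Dict.getD_empty, zero_add]

lemma grp_head (p : Int × Int) (l : List (Int × Int)) :
    ∃ v gs, grp (p :: l) = (p.1, v) :: gs := by
  cases h : grp l with
  | nil => exact ⟨p.2, [], by simp [grp, h]⟩
  | cons q gs =>
    by_cases hpq : p.1 = q.1
    · exact ⟨p.2 + q.2, gs, by simp [grp, h, hpq]⟩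
    · exact ⟨p.2, q :: gs, by simp [grp, h, hpq]⟩

lemma grp_nil_iff (l : List (Int × Int)) : grp l = [] ↔ l = [] := by
  cases l with
  | nil => simp [grp]
  | cons p rest =>
    obtain ⟨v, gs, hg⟩ := grp_head p rest
    simp [hg]

lemma grp_merge (c t q : Int) (l : List (Int × Int)) :
    grp ((c, t) :: (c, q) :: l) = grp ((c, t + q) :: l) := by
  cases h : grp l with
  | nil => simp [grp, h]
  | cons r gs =>
    by_cases hc : c = r.1
    · simp [grp, h, hc, add_assoc]
    · simp [grp, h, hc]

lemma grp_mem_fst {y : Int × Int} {l : List (Int × Int)} (h : y ∈ grp l) :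
    y.1 ∈ l.map Prod.fst := by
  induction l with
  | nil => simp [grp] at h
  | cons p rest ih =>
    simp only [grp] at h
    cases hg : grp rest with
    | nil =>
      rw [hg] at h
      simp only [List.mem_singleton] at h
      subst h
      simp
    | cons q gs =>
      rw [hg] at h
      by_cases hpq : p.1 = q.1
      · simp only [if_pos hpq] at h
        rcases List.mem_cons.mp h with h1 | h1
        · subst h1; simp
        · have : y ∈ grp rest := by rw [hg]; exact List.mem_cons_of_mem _ h1
          simp [ih this]
      · simp only [if_neg hpq] at h
        rcases List.mem_cons.mp h with h1 | h1
        · subst h1; simp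
        · have : y ∈ grp rest := by rw [hg]; exact h1
          simp [ih this]

lemma grp_pairwise {l : List (Int × Int)} (h : l.Pairwise (fun a b => a.1 ≤ b.1)) :
    (grp l).Pairwise (fun a b => a.1 < b.1) := by
  induction l with
  | nil => simp [grp]
  | cons p rest ih =>
    rw [List.pairwise_cons] at h
    obtain ⟨hp, hr⟩ := h
    have ihr := ih hr
    simp only [grp]
    cases hg : grp rest with
    | nil => simp
    | cons q gs =>
      rw [hg] at ihr
      rw [List.pairwise_cons] at ihr
      obtain ⟨hqgs, hgsp⟩ := ihr
      have hqmem : q.1 ∈ rest.map Prod.fst := by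
        have : q ∈ grp rest := by rw [hg]; exact List.mem_cons_self
        exact grp_mem_fst this
      obtain ⟨r, hrmem, hr1⟩ := List.mem_map.mp hqmem
      have hple : p.1 ≤ q.1 := hr1 ▸ hp r hrmem
      by_cases hpq : p.1 = q.1
      · simp only [if_pos hpq]
        exact List.Pairwise.cons (by intro y hy; simpa [hpq] using hqgs y hy) hgsp
      · simp only [if_neg hpq]
        have hplt : p.1 < q.1 := lt_of_le_of_ne hple hpq
        refine List.Pairwise.cons ?_ (List.Pairwise.cons hqgs hgsp)
        intro y hy
        rcases List.mem_cons.mp hy with h1 | h1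
        · subst h1; exact hplt
        · exact lt_trans hplt (hqgs y h1)

lemma sumAt_of_not_mem {l : List (Int × Int)} {k : Int} (h : k ∉ l.map Prod.fst) :
    sumAt l k = 0 := by
  induction l with
  | nil => simp [sumAt]
  | cons p rest ih =>
    rw [List.map_cons, List.mem_cons, not_or] at h
    rw [sumAt_cons, if_neg (by intro e; exact h.1 e.symm), ih h.2]
    ring

lemma grp_mem_iff {l : List (Int × Int)} (h : l.Pairwise (fun a b => a.1 ≤ b.1)) (k v : Int) :
    (k, v) ∈ grp l ↔ k ∈ l.map Prod.fst ∧ v = sumAt l k := by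
  induction l generalizing k v with
  | nil => simp [grp, sumAt]
  | cons p rest ih =>
    rw [List.pairwise_cons] at h
    obtain ⟨hp, hr⟩ := h
    cases hg : grp rest with
    | nil =>
      have hrest : rest = [] := (grp_nil_iff rest).mp hg
      subst hrest
      constructor
      · intro hm
        simp only [grp] at hm
        rw [List.mem_singleton, Prod.mk.injEq] at hm
        refine ⟨by simp [hm.1], ?_⟩
        rw [hm.1, hm.2, sumAt_cons, if_pos rfl]
        simp [sumAt]
      · rintro ⟨hk, hv⟩
        simp only [List.map_cons, List.map_nil, List.mem_singleton] at hk
        subst hk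
        rw [sumAt_cons, if_pos rfl] at hv
        simp only [sumAt, List.filter_nil, List.map_nil, List.sum_nil, add_zero] at hv
        simp [grp, hv]
    | cons q gs =>
      have hq : q ∈ grp rest := by rw [hg]; exact List.mem_cons_self
      have hq2 : q.2 = sumAt rest q.1 := ((ih hr q.1 q.2).mp (by simpa using hq)).2
      have hq1mem : q.1 ∈ rest.map Prod.fst := grp_mem_fst hq
      have hpwg := grp_pairwise hr
      rw [hg, List.pairwise_cons] at hpwg
      obtain ⟨hqgs, _⟩ := hpwg
      obtain ⟨r, hrmem, hr1⟩ := List.mem_map.mp hq1mem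
      have hple : p.1 ≤ q.1 := hr1 ▸ hp r hrmem
      have hmin : ∀ x ∈ rest.map Prod.fst, q.1 ≤ x := by
        cases rest with
        | nil => simp at hq1mem
        | cons r0 rest' =>
          obtain ⟨v', gs', hgg⟩ := grp_head r0 rest'
          rw [hgg] at hg
          injection hg with e1 _
          have hq1 : q.1 = r0.1 := by rw [← e1]
          rw [List.pairwise_cons] at hr
          intro x hx
          simp only [List.map_cons, List.mem_cons] at hx
          rcases hx with hx | hx
          · rw [hq1, hx]
          · obtain ⟨y, hy, hyx⟩ := List.mem_map.mp hx
            rw [hq1, ← hyx]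
            exact hr.1 y hy
      simp only [grp, hg]
      by_cases hkp : k = p.1
      · subst hkp
        have hsum : sumAt (p :: rest) p.1 = p.2 + sumAt rest p.1 := by
          rw [sumAt_cons, if_pos rfl]
        by_cases hpq : p.1 = q.1
        · simp only [if_pos hpq]
          constructor
          · intro hm
            rcases List.mem_cons.mp hm with h1 | h1
            · rw [Prod.mk.injEq] at h1
              refine ⟨by simp, ?_⟩
              rw [hsum, h1.2, hpq, hq2]
            · exact absurd (hqgs _ h1) (by simp [← hpq])
          · rintro ⟨-, hv⟩
            rw [hsum, hpq, ← hq2] at hv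
            rw [hv]
            exact List.mem_cons_self
        · simp only [if_neg hpq]
          have hnot : p.1 ∉ rest.map Prod.fst := by
            intro hmem
            exact hpq (le_antisymm hple (hmin _ hmem))
          constructor
          · intro hm
            rcases List.mem_cons.mp hm with h1 | h1
            · rw [Prod.mk.injEq] at h1
              refine ⟨by simp, ?_⟩
              rw [hsum, sumAt_of_not_mem hnot, h1.2]
              ring
            · exfalso
              have h2 : (p.1, v) ∈ grp rest := by rw [hg]; exact h1
              exact hnot ((ih hr p.1 v).mp h2).1
          · rintro ⟨-, hv⟩
            rw [hsum, sumAt_of_not_mem hnot, add_zero] at hv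
            rw [hv]
            exact List.mem_cons_self
      · have hsum : sumAt (p :: rest) k = sumAt rest k := by
          rw [sumAt_cons, if_neg (fun e => hkp e.symm), zero_add]
        have hmem_rest : ((k, v) ∈ grp rest ↔ k ∈ rest.map Prod.fst ∧ v = sumAt rest k) :=
          ih hr k v
        rw [hg] at hmem_rest
        have hrhs : (k ∈ (p :: rest).map Prod.fst ∧ v = sumAt (p :: rest) k) ↔
            (k ∈ rest.map Prod.fst ∧ v = sumAt rest k) := by
          rw [hsum]
          simp only [List.map_cons, List.mem_cons]
          constructor
          · rintro ⟨hk | hk, hv⟩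
            · exact absurd hk hkp
            · exact ⟨hk, hv⟩
          · rintro ⟨hk, hv⟩
            exact ⟨Or.inr hk, hv⟩
        rw [hrhs, ← hmem_rest]
        by_cases hpq : p.1 = q.1
        · simp only [if_pos hpq]
          constructor
          · intro hm
            rcases List.mem_cons.mp hm with h1 | h1
            · exact absurd (congrArg Prod.fst h1).symm (by omega)
            · exact List.mem_cons_of_mem _ h1
          · intro hm
            rcases List.mem_cons.mp hm with h1 | h1
            · exact absurd (congrArg Prod.fst h1).symm (by omega)
            · exact List.mem_cons_of_mem _ h1
        · simp only [if_neg hpq]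
          constructor
          · intro hm
            rcases List.mem_cons.mp hm with h1 | h1
            · exact absurd (congrArg Prod.fst h1).symm (by omega)
            · exact h1
          · intro hm
            exact List.mem_cons_of_mem _ hm

lemma bfold (l : List (Int × Int)) :
    ∀ (res : List (Int × Int)) (c t : Int),
      pvBFin (l.foldl pvBStep (res, some c, t)) = res ++ grp ((c, t) :: l) := by
  induction l with
  | nil =>
    intro res c t
    simp [pvBFin, grp]
  | cons pq l ih =>
    intro res c t
    simp only [List.foldl_cons]
    by_cases h : pq.1 = c
    · rw [show pvBStep (res, some c, t) pq = (res, some c, t + pq.2) from by simp [pvBStep, h]]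
      rw [ih]
      have : grp ((c, t) :: pq :: l) = grp ((c, t + pq.2) :: l) := by
        have hpq : pq = (c, pq.2) := by rw [← h]
        rw [hpq, grp_merge]
      rw [this]
    · rw [show pvBStep (res, some c, t) pq = (res ++ [(c, t)], some pq.1, pq.2) from by simp [pvBStep, h]]
      rw [ih]
      have hcp : ¬ c = pq.1 := fun e => h e.symm
      have : grp ((c, t) :: pq :: l) = (c, t) :: grp (pq :: l) := by
        simp only [grp]
        cases hgl : grp l with
        | nil => simp only [if_neg hcp]
        | cons q gs =>
          by_cases hq : pq.1 = q.1
          · simp only [if_pos hq, if_neg hcp]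
          · simp only [if_neg hq, if_neg hcp]
      rw [this, List.append_assoc, List.singleton_append]

lemma alt_eq_grp (xs : List (Int × Int)) :
    aggregate_price_alt xs = grp (PySem.List.sorted xs (fun x => x.1) false) := by
  unfold aggregate_price_alt
  cases h : PySem.List.sorted xs (fun x => x.1) false with
  | nil => simp [pvBFin, grp]
  | cons pq rest =>
    simp only [List.foldl_cons]
    rw [show pvBStep ([], none, 0) pq = ([], some pq.1, pq.2) from rfl]
    rw [bfold]
    simp [grp]

-- ===== VERDICT (by name: the statement is the Claim_ definition above) =====
theorem aggregate_price_spec : Claim_equal_aggregate_price := by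
  intro xs _
  unfold Spec_aggregate_price
  have hA : aggregate_price xs
      = PySem.List.sorted ((PySem.Set.ofList (xs.map Prod.fst)).map (fun k => (k, sumAt xs k)))
          (fun x => x.1) false := by
    simp only [aggregate_price]
    rw [PySem.List.foldl_append_singleton_eq_map, items_fold]
    simp [Function.comp_def]
  have hop : (PySem.List.sorted xs (fun x => x.1) false).Perm xs :=
    PySem.List.sorted_perm xs (fun x => x.1) false
  have hsort : (PySem.List.sorted xs (fun x => x.1) false).Pairwise (fun a b => a.1 ≤ b.1) :=
    PySem.List.sorted_pairwise xs (fun x => x.1)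
  have hpw := grp_pairwise hsort
  have hnd1 : (grp (PySem.List.sorted xs (fun x => x.1) false)).Nodup :=
    hpw.imp (fun hlt e => absurd (congrArg Prod.fst e) (ne_of_lt hlt))
  have hinj : Function.Injective (fun k : Int => (k, sumAt xs k)) :=
    fun a b e => congrArg Prod.fst e
  have hnd2 : ((PySem.Set.ofList (xs.map Prod.fst)).map (fun k => (k, sumAt xs k))).Nodup :=
    (PySem.Set.nodup_ofList _).map hinj
  rw [hA, alt_eq_grp]
  apply PySem.List.sorted_eq_of_perm_of_pairwise_lt
  · rw [List.perm_ext_iff_of_nodup hnd1 hnd2]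
    intro a
    have h1 : a ∈ grp (PySem.List.sorted xs (fun x => x.1) false)
        ↔ a.1 ∈ (PySem.List.sorted xs (fun x => x.1) false).map Prod.fst
            ∧ a.2 = sumAt (PySem.List.sorted xs (fun x => x.1) false) a.1 := by
      simpa using grp_mem_iff hsort a.1 a.2
    rw [h1, (hop.map Prod.fst).mem_iff, sumAt_perm hop]
    constructor
    · rintro ⟨hk, hv⟩
      refine List.mem_map.mpr ⟨a.1, (PySem.Set.mem_ofList _ _).mpr hk, ?_⟩
      rw [← hv]
    · intro hm
      obtain ⟨k, hk, he⟩ := List.mem_map.mp hm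
      have hk1 : a.1 = k := (congrArg Prod.fst he).symm
      refine ⟨hk1 ▸ (PySem.Set.mem_ofList _ _).mp hk, ?_⟩
      rw [hk1, ← (congrArg Prod.snd he)]
  · exact hpw
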